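-- pv_equiv track=rewrite | github.com/katana108/playground | agents/sofico/current-build/src/services/artifact_generation_service.py | _render_question_section
-- ===== SOURCE A (Python) =====
-- from typing import Any, Dict, List
--
-- def _render_question_section(questions: List[Dict[str, Any]]) -> str:
--     """Render stored question records back into the markdown question format."""
--     ordered_categories = ["Recall", "Explain", "Apply", "Connect"]
--     by_category: Dict[str, List[Dict[str, Any]]] = {name: [] for name in ordered_categories}
--     for question in questions:
--         category = str(question.get("category") or question.get("type") or "").strip().title()
--         if category not in by_category:
--             by_category.setdefault(category, [])
--         by_category[category].append(question)
--
--     lines = ["## Anki Questions", ""]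
--     question_number = 1
--     for category in ordered_categories:
--         category_questions = by_category.get(category, [])
--         if not category_questions:
--             continue
--         lines.append(f"### {category}")
--         lines.append("")
--         for question in category_questions:
--             text = str(question.get("text") or "").strip()
--             answer = str(question.get("answer") or "").strip()
--             if not text or not answer:
--                 continue
--             lines.append(f"**Q{question_number}:** {text}")
--             lines.append(f"**A{question_number}:** {answer}")
--             lines.append("")
--             question_number += 1
--     return "\n".join(lines).rstrip()
-- ===== SOURCE B (Python) =====
-- from typing import Any, Dict, List
--
-- def _render_question_section(questions: List[Dict[str, Any]]) -> str:
--     """Single pass partitions questions into four fixed buckets of pre-stripped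
--     (text, answer) pairs; each bucket is then rendered as one section."""
--     recall: list = []
--     explain: list = []
--     apply_: list = []
--     connect: list = []
--     for question in questions:
--         category = str(question.get("category") or question.get("type") or "").strip().title()
--         pair = (str(question.get("text") or "").strip(),
--                 str(question.get("answer") or "").strip())
--         if category == "Recall":
--             recall.append(pair)
--         elif category == "Explain":
--             explain.append(pair)
--         elif category == "Apply":
--             apply_.append(pair)
--         elif category == "Connect":
--             connect.append(pair)
--
--     def qa_lines(pairs, n):
--         if not pairs:
--             return [], n
--         (text, answer), rest = pairs[0], pairs[1:]
--         if not text or not answer: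
--             return qa_lines(rest, n)
--         tail, n_final = qa_lines(rest, n + 1)
--         return ["**Q%d:** %s" % (n, text), "**A%d:** %s" % (n, answer), ""] + tail, n_final
--
--     def section(name, pairs, n):
--         if not pairs:
--             return [], n
--         body, n_final = qa_lines(pairs, n)
--         return ["### " + name, ""] + body, n_final
--
--     out = ["## Anki Questions", ""]
--     n = 1
--     for name, pairs in (("Recall", recall), ("Explain", explain),
--                         ("Apply", apply_), ("Connect", connect)):
--         sec, n = section(name, pairs, n)
--         out += sec
--     return "\n".join(out).rstrip()
-- ===== Notes on version B (the rewrite author's own statement) =====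
-- stated objective: alternative
-- what changed: Replaces A's by_category dict (grouping loop + getD per category) with a single-pass partition into four fixed tuple buckets of pre-stripped (text, answer) pairs, rendered by a recursive section/qa_lines decomposition instead of A's flat line-accumulator loop.
import Mathlib
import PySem

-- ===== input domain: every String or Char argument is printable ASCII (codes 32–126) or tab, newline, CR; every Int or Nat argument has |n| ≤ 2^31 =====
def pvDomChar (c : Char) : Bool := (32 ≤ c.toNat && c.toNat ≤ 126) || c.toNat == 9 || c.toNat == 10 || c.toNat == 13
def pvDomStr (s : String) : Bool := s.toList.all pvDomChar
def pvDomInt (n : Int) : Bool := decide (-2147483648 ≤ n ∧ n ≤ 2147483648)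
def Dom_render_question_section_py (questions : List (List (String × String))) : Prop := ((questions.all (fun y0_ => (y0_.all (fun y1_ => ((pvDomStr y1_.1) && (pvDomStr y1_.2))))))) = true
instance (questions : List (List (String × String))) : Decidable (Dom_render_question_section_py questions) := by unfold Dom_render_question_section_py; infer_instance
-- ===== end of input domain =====

-- B replaces A's by_category dict with a one-pass partition into four fixed buckets of
-- pre-stripped (text, answer) pairs, rendered by a recursive section decomposition (objective: alternative).

-- ===== shared helpers (this normalization code is textually identical in both Pythons) =====

-- question.get(k) on the association-list dict (first match)
def dGet (q : List (String × String)) (k : String) : Option String :=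
  (PySem.Dict.mk q).get? k

-- Python's 'x or alt' for an optional string: missing key (None) and "" are falsy
def orDefault : Option String → String → String
  | some s, alt => if s = "" then alt else s
  | none, alt => alt

-- str.title(), hand-ported (no PySem primitive): exact on the ASCII domain, where 'cased' = isalpha
def titleChars : Bool → List Char → List Char
  | _, [] => []
  | prev, c :: cs =>
    if PySem.Chars.isalpha c then
      (if prev then PySem.Chars.lowerChar c else PySem.Chars.upperChar c) :: titleChars true cs
    else c :: titleChars false cs

def pyTitle (s : String) : String := String.ofList (titleChars false s.toList)

-- str(q.get("category") or q.get("type") or "").strip().title()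
def normCat (q : List (String × String)) : String :=
  pyTitle (PySem.Str.strip (orDefault (dGet q "category") (orDefault (dGet q "type") "")))

-- ===== PORT A =====

-- {name: [] for name in ordered_categories}
def initByCat : PySem.Dict String (List (List (String × String))) :=
  ((((PySem.Dict.empty.insert "Recall" []).insert "Explain" []).insert "Apply" []).insert "Connect" [])

-- the body of A's grouping loop
def addQ (d : PySem.Dict String (List (List (String × String)))) (q : List (String × String)) :
    PySem.Dict String (List (List (String × String))) :=
  let cat := normCat q
  let d' := if d.contains cat then d else d.setdefault cat []
  d'.modify cat [] (· ++ [q])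

-- the body of A's inner rendering loop: state = (lines, question_number)
def renderQA (st : List String × Int) (q : List (String × String)) : List String × Int :=
  let text := PySem.Str.strip (orDefault (dGet q "text") "")
  let answer := PySem.Str.strip (orDefault (dGet q "answer") "")
  if text = "" ∨ answer = "" then st
  else (st.1 ++ ["**Q" ++ PySem.Int.toStr st.2 ++ ":** " ++ text,
                 "**A" ++ PySem.Int.toStr st.2 ++ ":** " ++ answer, ""], st.2 + 1)

def render_question_section_py (questions : List (List (String × String))) : String :=
  let byCat := questions.foldl addQ initByCat
  let st := ["Recall", "Explain", "Apply", "Connect"].foldl (fun st cat =>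
      let cqs := byCat.getD cat []
      if cqs = [] then st
      else cqs.foldl renderQA (st.1 ++ ["### " ++ cat, ""], st.2))
    (["## Anki Questions", ""], 1)
  PySem.Str.rstrip (PySem.Str.join "\n" st.1)

-- ===== PORT B =====

-- the stripped (text, answer) pair B stores in its buckets
def pairOf (q : List (String × String)) : String × String :=
  (PySem.Str.strip (orDefault (dGet q "text") ""),
   PySem.Str.strip (orDefault (dGet q "answer") ""))

-- B's single partition pass: four fixed buckets, appended to in order (the if/elif chain)
def partition4 (questions : List (List (String × String))) :
    List (String × String) × List (String × String) × List (String × String) × List (String × String) :=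
  questions.foldl (fun acc q =>
      let cat := normCat q
      let pair := pairOf q
      if cat = "Recall" then (acc.1 ++ [pair], acc.2.1, acc.2.2.1, acc.2.2.2)
      else if cat = "Explain" then (acc.1, acc.2.1 ++ [pair], acc.2.2.1, acc.2.2.2)
      else if cat = "Apply" then (acc.1, acc.2.1, acc.2.2.1 ++ [pair], acc.2.2.2)
      else if cat = "Connect" then (acc.1, acc.2.1, acc.2.2.1, acc.2.2.2 ++ [pair])
      else acc)
    ([], [], [], [])

-- B's qa_lines: recursively render pre-stripped pairs, returning (lines, next number)
def qaLines : List (String × String) → Int → List String × Int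
  | [], n => ([], n)
  | (text, answer) :: rest, n =>
    if text = "" ∨ answer = "" then qaLines rest n
    else
      let tn := qaLines rest (n + 1)
      (("**Q" ++ PySem.Int.toStr n ++ ":** " ++ text) ::
       ("**A" ++ PySem.Int.toStr n ++ ":** " ++ answer) :: "" :: tn.1, tn.2)

-- B's section: header plus body for one non-empty bucket
def section4 (name : String) (pairs : List (String × String)) (n : Int) : List String × Int :=
  if pairs = [] then ([], n)
  else
    let bn := qaLines pairs n
    (("### " ++ name) :: "" :: bn.1, bn.2)

def render_question_section_py_alt (questions : List (List (String × String))) : String :=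
  let p := partition4 questions
  let st := [("Recall", p.1), ("Explain", p.2.1), ("Apply", p.2.2.1), ("Connect", p.2.2.2)].foldl
    (fun st nb =>
      let sn := section4 nb.1 nb.2 st.2
      (st.1 ++ sn.1, sn.2))
    (["## Anki Questions", ""], 1)
  PySem.Str.rstrip (PySem.Str.join "\n" st.1)

-- ===== PRECONDITION & SPEC =====
def Spec_render_question_section_py (questions : List (List (String × String))) (out : String) : Prop := out = render_question_section_py_alt questions
instance (questions : List (List (String × String))) (out : String) : Decidable (Spec_render_question_section_py questions out) := by unfold Spec_render_question_section_py; infer_instance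

-- ===== CLAIM (what is proved, stated in full; the proofs are below) =====
def Claim_equal_render_question_section_py : Prop := ∀ (questions : List (List (String × String))), Dom_render_question_section_py questions → Spec_render_question_section_py questions (render_question_section_py questions)

-- ===== LEMMAS AND PROOFS =====

-- every value in the initial dict is [], and [] is also getD's default
lemma initByCat_getD (c : String) : initByCat.getD c [] = [] := by
  unfold initByCat
  simp [PySem.Dict.getD_insert, PySem.Dict.getD_empty]

-- one grouping step appends q to exactly its category's bucket (as seen through getD _ [])
lemma addQ_getD (d : PySem.Dict String (List (List (String × String))))
    (q : List (String × String)) (c : String) :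
    (addQ d q).getD c [] = d.getD c [] ++ (if normCat q = c then [q] else []) := by
  unfold addQ
  have hsd : ∀ x, (d.setdefault (normCat q) []).getD x ([] : List (List (String × String))) = d.getD x [] := by
    intro x
    by_cases h : x = normCat q
    · subst h; exact PySem.Dict.getD_setdefault_self ..
    · rw [PySem.Dict.getD_eq_get?_getD, PySem.Dict.get?_setdefault_of_ne _ _ h,
        ← PySem.Dict.getD_eq_get?_getD]
  by_cases hc : d.contains (normCat q) <;>
    simp only [hc, if_true, if_false, Bool.false_eq_true,
      PySem.Dict.getD_modify, hsd] <;>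
    · by_cases h : c = normCat q
      · simp [h]
      · simp [h, Ne.symm h]

-- A's grouping loop, read back through getD _ [], is a filter of the question list
lemma foldl_addQ_getD (qs : List (List (String × String)))
    (d : PySem.Dict String (List (List (String × String)))) (c : String) :
    (qs.foldl addQ d).getD c [] = d.getD c [] ++ qs.filter (fun q => normCat q = c) := by
  induction qs generalizing d with
  | nil => simp
  | cons q qs ih =>
    simp only [List.foldl_cons, ih, addQ_getD, List.filter_cons]
    by_cases h : normCat q = c <;> simp [h]

lemma byCat_getD (qs : List (List (String × String))) (c : String) :
    (qs.foldl addQ initByCat).getD c [] = qs.filter (fun q => normCat q = c) := by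
  rw [foldl_addQ_getD, initByCat_getD, List.nil_append]

-- each bucket of B's partition is the stripped pairs of that category's filter
lemma partition4_spec (qs : List (List (String × String))) :
    partition4 qs = ((qs.filter (fun q => normCat q = "Recall")).map pairOf,
                     (qs.filter (fun q => normCat q = "Explain")).map pairOf,
                     (qs.filter (fun q => normCat q = "Apply")).map pairOf,
                     (qs.filter (fun q => normCat q = "Connect")).map pairOf) := by
  unfold partition4
  suffices h : ∀ (r e a c : List (String × String)),
      qs.foldl (fun acc q =>
        let cat := normCat q
        let pair := pairOf q
        if cat = "Recall" then (acc.1 ++ [pair], acc.2.1, acc.2.2.1, acc.2.2.2)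
        else if cat = "Explain" then (acc.1, acc.2.1 ++ [pair], acc.2.2.1, acc.2.2.2)
        else if cat = "Apply" then (acc.1, acc.2.1, acc.2.2.1 ++ [pair], acc.2.2.2)
        else if cat = "Connect" then (acc.1, acc.2.1, acc.2.2.1, acc.2.2.2 ++ [pair])
        else acc) (r, e, a, c)
      = (r ++ (qs.filter (fun q => normCat q = "Recall")).map pairOf,
         e ++ (qs.filter (fun q => normCat q = "Explain")).map pairOf,
         a ++ (qs.filter (fun q => normCat q = "Apply")).map pairOf,
         c ++ (qs.filter (fun q => normCat q = "Connect")).map pairOf) by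
    simpa using h [] [] [] []
  induction qs with
  | nil => intro r e a c; simp
  | cons q qs ih =>
    intro r e a c
    simp only [List.foldl_cons, List.filter_cons]
    by_cases h1 : normCat q = "Recall"
    · simp [h1, ih]
    · by_cases h2 : normCat q = "Explain"
      · simp [h2, ih]
      · by_cases h3 : normCat q = "Apply"
        · simp [h3, ih]
        · by_cases h4 : normCat q = "Connect"
          · simp [h4, ih]
          · simp [h1, h2, h3, h4, ih]

-- A's inner rendering fold over a group = B's qaLines on the stripped pairs, appended
lemma foldl_renderQA (g : List (List (String × String))) (lines : List String) (n : Int) :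
    g.foldl renderQA (lines, n)
      = (lines ++ (qaLines (g.map pairOf) n).1, (qaLines (g.map pairOf) n).2) := by
  induction g generalizing lines n with
  | nil => simp [qaLines]
  | cons q g ih =>
    simp only [List.foldl_cons, List.map_cons, renderQA, pairOf, qaLines]
    split_ifs with h
    · exact ih lines n
    · simp [ih, List.append_assoc]

-- one category step of A's outer loop = one step of B's outer loop (given the bucket = the filter)
lemma step_eq (c : String) (g : List (List (String × String))) (st : List String × Int) :
    (if g = [] then st else g.foldl renderQA (st.1 ++ ["### " ++ c, ""], st.2))
      = (st.1 ++ (section4 c (g.map pairOf) st.2).1, (section4 c (g.map pairOf) st.2).2) := by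
  unfold section4
  by_cases h : g = []
  · simp [h]
  · have hm : g.map pairOf ≠ [] := by simpa using h
    simp [h, hm, foldl_renderQA, List.append_assoc]

-- ===== VERDICT (by name: the statement is the Claim_ definition above) =====
theorem render_question_section_py_spec : Claim_equal_render_question_section_py := by
  intro questions _
  unfold Spec_render_question_section_py render_question_section_py render_question_section_py_alt
  simp only [partition4_spec, List.foldl_cons, List.foldl_nil, byCat_getD, step_eq]
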